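-- pv_equiv track=rewrite | github.com/h2oung/Synapse-checkpoint | benchmarks/soft_target/planner/optimizer.py | partition_to_indices
-- ===== SOURCE A (Python) =====
-- def partition_to_indices(partition_lengths):
--     indices = []
--     start = 0
--     for length in partition_lengths:
--         end = start + length
--         indices.append((start, end))
--         start = end
--     return indices
-- ===== SOURCE B (Python) =====
-- from itertools import accumulate
--
-- def partition_to_indices(partition_lengths):
--     bounds = list(accumulate(partition_lengths, initial=0))
--     return list(zip(bounds, bounds[1:]))
-- ===== Notes on version B (the rewrite author's own statement) =====
-- stated objective: idiomatic
-- what changed: Replaces the running-accumulator loop with a prefix-boundary table built by itertools.accumulate followed by adjacent pairing via zip(bounds, bounds[1:]).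
import Mathlib
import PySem

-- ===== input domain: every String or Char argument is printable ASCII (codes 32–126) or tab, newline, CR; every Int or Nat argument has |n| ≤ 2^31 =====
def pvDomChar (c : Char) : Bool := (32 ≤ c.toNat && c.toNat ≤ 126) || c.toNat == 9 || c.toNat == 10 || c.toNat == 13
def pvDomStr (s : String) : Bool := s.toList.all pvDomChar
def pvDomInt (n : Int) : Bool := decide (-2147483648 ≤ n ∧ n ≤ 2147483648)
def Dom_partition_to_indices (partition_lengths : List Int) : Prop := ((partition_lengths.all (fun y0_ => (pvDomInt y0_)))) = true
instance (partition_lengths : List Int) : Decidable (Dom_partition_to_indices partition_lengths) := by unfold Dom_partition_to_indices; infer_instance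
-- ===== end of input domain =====

-- B builds a prefix-boundary table then pairs adjacent boundaries; A keeps a running start in one loop.

-- ===== PORT A =====
-- A: one loop with accumulator state (indices, start)
def partition_to_indices (partition_lengths : List Int) : List (Int × Int) :=
  (partition_lengths.foldl
    (fun (st : List (Int × Int) × Int) (length : Int) =>
      let start := st.2
      let «end» := start + length
      (st.1 ++ [(start, «end»)], «end»))
    ([], 0)).1

-- ===== PORT B =====
-- B: bounds = accumulate(partition_lengths, initial=0) = scanl; result = zip bounds bounds[1:]
def partition_to_indices_alt (partition_lengths : List Int) : List (Int × Int) :=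
  let bounds := partition_lengths.scanl (· + ·) 0
  bounds.zip bounds.tail

-- ===== PRECONDITION & SPEC =====
def Spec_partition_to_indices (partition_lengths : List Int) (out : List (Int × Int)) : Prop := out = partition_to_indices_alt partition_lengths
instance (partition_lengths : List Int) (out : List (Int × Int)) : Decidable (Spec_partition_to_indices partition_lengths out) := by unfold Spec_partition_to_indices; infer_instance

-- ===== CLAIM (what is proved, stated in full; the proofs are below) =====
def Claim_equal_partition_to_indices : Prop := ∀ (partition_lengths : List Int), Dom_partition_to_indices partition_lengths → Spec_partition_to_indices partition_lengths (partition_to_indices partition_lengths)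

-- ===== LEMMAS AND PROOFS =====

theorem pti_foldl_acc (ls : List Int) (acc : List (Int × Int)) (s : Int) :
    (ls.foldl
      (fun (st : List (Int × Int) × Int) (length : Int) =>
        (st.1 ++ [(st.2, st.2 + length)], st.2 + length))
      (acc, s)).1
    = acc ++ (ls.scanl (· + ·) s).zip (ls.scanl (· + ·) s).tail := by
  induction ls generalizing acc s with
  | nil => simp [List.scanl]
  | cons l ls ih =>
    simp only [List.foldl, List.scanl, List.tail]
    rw [ih]
    cases ls with
    | nil => simp [List.scanl]
    | cons l' ls' => simp [List.scanl, List.zip]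

-- ===== VERDICT (by name: the statement is the Claim_ definition above) =====
theorem partition_to_indices_spec : Claim_equal_partition_to_indices := by
  intro ls _
  show _ = _
  simpa [partition_to_indices, partition_to_indices_alt] using pti_foldl_acc ls [] 0
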